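-- pv_equiv track=rewrite | github.com/jolie-png/market-scan | utils/helpers.py | categorize_company
-- ===== SOURCE A (Python) =====
-- def categorize_company(company_name: str, content: str = "") -> str:
--     """
--     Attempt to categorize a company based on its name and content
--
--     Args:
--         company_name: Name of the company
--         content: Additional content to help with categorization
--
--     Returns:
--         Suggested category string
--     """
--     company_lower = company_name.lower()
--     content_lower = content.lower() if content else ""
--
--     # Category keywords mapping
--     category_keywords = {
--         'SaaS': ['saas', 'software', 'platform', 'cloud', 'app', 'service'],
--         'E-commerce': ['shop', 'store', 'retail', 'marketplace', 'commerce', 'buy', 'sell'],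
--         'Fintech': ['finance', 'banking', 'payment', 'fintech', 'money', 'investment'],
--         'Healthcare': ['health', 'medical', 'care', 'hospital', 'clinic', 'pharma'],
--         'Education': ['education', 'learning', 'school', 'university', 'course', 'training'],
--         'Marketing': ['marketing', 'advertising', 'campaign', 'promotion', 'brand'],
--         'Analytics': ['analytics', 'data', 'insights', 'intelligence', 'reporting'],
--         'Communication': ['communication', 'messaging', 'chat', 'video', 'conference'],
--         'Productivity': ['productivity', 'workflow', 'management', 'organization'],
--         'Security': ['security', 'protection', 'cyber', 'antivirus', 'firewall']
--     }
--
--     # Check both company name and content for category indicators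
--     combined_text = f"{company_lower} {content_lower}"
--
--     category_scores = {}
--     for category, keywords in category_keywords.items():
--         score = sum(1 for keyword in keywords if keyword in combined_text)
--         if score > 0:
--             category_scores[category] = score
--
--     # Return category with highest score, or 'Other' if no matches
--     if category_scores:
--         return max(category_scores.keys(), key=lambda k: category_scores[k])
--     else:
--         return 'Other'
-- ===== SOURCE B (Python) =====
-- CATEGORY_KEYWORDS = [
--     ('SaaS', ['saas', 'software', 'platform', 'cloud', 'app', 'service']),
--     ('E-commerce', ['shop', 'store', 'retail', 'marketplace', 'commerce', 'buy', 'sell']),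
--     ('Fintech', ['finance', 'banking', 'payment', 'fintech', 'money', 'investment']),
--     ('Healthcare', ['health', 'medical', 'care', 'hospital', 'clinic', 'pharma']),
--     ('Education', ['education', 'learning', 'school', 'university', 'course', 'training']),
--     ('Marketing', ['marketing', 'advertising', 'campaign', 'promotion', 'brand']),
--     ('Analytics', ['analytics', 'data', 'insights', 'intelligence', 'reporting']),
--     ('Communication', ['communication', 'messaging', 'chat', 'video', 'conference']),
--     ('Productivity', ['productivity', 'workflow', 'management', 'organization']),
--     ('Security', ['security', 'protection', 'cyber', 'antivirus', 'firewall']),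
-- ]
--
-- # Inverted index: one flat list of (category, keyword) patterns, then bucketed
-- # by the keyword's first character for the position scan.
-- KEYWORD_INDEX = [(cat, kw) for cat, kws in CATEGORY_KEYWORDS for kw in kws]
--
-- FIRST_CHAR_INDEX = {}
-- for _pair in KEYWORD_INDEX:
--     FIRST_CHAR_INDEX.setdefault(_pair[1][0], []).append(_pair)
--
--
-- def categorize_company(company_name: str, content: str = "") -> str:
--     """Text-driven multi-pattern scan: walk every start position of the combined
--     lowered text once, consulting a first-character bucket of the inverted
--     (category, keyword) index to collect the set of patterns matching there; a
--     single strict running-max reduction over the categories then picks the first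
--     category with the highest number of matched patterns ('Other' if none)."""
--     text = (company_name + " " + content).lower()
--     found = set()
--     for i in range(len(text)):
--         for pair in FIRST_CHAR_INDEX.get(text[i], ()):
--             if text.startswith(pair[1], i):
--                 found.add(pair)
--     best_category, best_score = 'Other', 0
--     for cat, kws in CATEGORY_KEYWORDS:
--         score = sum(1 for kw in kws if (cat, kw) in found)
--         if score > best_score:
--             best_category, best_score = cat, score
--     return best_category
-- ===== Notes on version B (the rewrite author's own statement) =====
-- stated objective: alternative
-- what changed: Replaces A's keyword-major structure (per-category substring tests via 'in', a score dict, then max over its keys) by a text-major multi-pattern scan: one walk over every start position of the combined lowered text consults a first-character bucketed inverted index of (category, keyword) patterns and collects the set of patterns matching there, and a single strict running-max reduction over the categories then picks the winner.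
import Mathlib
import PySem

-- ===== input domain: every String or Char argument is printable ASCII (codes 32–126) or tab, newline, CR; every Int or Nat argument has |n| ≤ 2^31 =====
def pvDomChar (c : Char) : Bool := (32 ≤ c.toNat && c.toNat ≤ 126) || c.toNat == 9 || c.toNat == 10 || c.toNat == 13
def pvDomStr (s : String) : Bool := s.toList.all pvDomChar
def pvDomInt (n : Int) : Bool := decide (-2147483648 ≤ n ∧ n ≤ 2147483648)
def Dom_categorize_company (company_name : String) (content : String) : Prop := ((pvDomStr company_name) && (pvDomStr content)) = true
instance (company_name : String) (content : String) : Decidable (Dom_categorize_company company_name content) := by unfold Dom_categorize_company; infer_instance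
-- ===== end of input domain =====

-- B replaces A's per-keyword substring tests + score dict + max(keys) by a text-driven
-- multi-pattern scan: each start position of the combined lowered text consults a
-- first-character bucketed inverted (category, keyword) index, collecting matches into a
-- set, then one strict running-max reduction picks the category; same return value.


-- ===== PORT A =====
def categorize_company (company_name : String) (content : String) : String :=
  let company_lower := PySem.Str.lower company_name
  let content_lower := if content ≠ "" then PySem.Str.lower content else ""
  let category_keywords : List (String × List String) :=
    [("SaaS", ["saas", "software", "platform", "cloud", "app", "service"]),
     ("E-commerce", ["shop", "store", "retail", "marketplace", "commerce", "buy", "sell"]),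
     ("Fintech", ["finance", "banking", "payment", "fintech", "money", "investment"]),
     ("Healthcare", ["health", "medical", "care", "hospital", "clinic", "pharma"]),
     ("Education", ["education", "learning", "school", "university", "course", "training"]),
     ("Marketing", ["marketing", "advertising", "campaign", "promotion", "brand"]),
     ("Analytics", ["analytics", "data", "insights", "intelligence", "reporting"]),
     ("Communication", ["communication", "messaging", "chat", "video", "conference"]),
     ("Productivity", ["productivity", "workflow", "management", "organization"]),
     ("Security", ["security", "protection", "cyber", "antivirus", "firewall"])]
  -- combined_text = f"{company_lower} {content_lower}"
  let combined_text := company_lower ++ " " ++ content_lower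
  let category_scores :=
    category_keywords.foldl (fun d p =>
      let score : Int :=
        ((p.2.filter (fun keyword => PySem.Str.isIn keyword combined_text)).map
          (fun _ => (1 : Int))).sum
      if score > 0 then d.insert p.1 score else d) PySem.Dict.empty
  if category_scores.size ≠ 0 then
    -- max over the (nonempty) keys; the "Other" default of getD is unreachable here
    (PySem.List.max? category_scores.keys (fun k => category_scores.getD k 0)).getD "Other"
  else "Other"

-- ===== PORT B =====
def pvCategoryKeywords : List (String × List String) :=
  [("SaaS", ["saas", "software", "platform", "cloud", "app", "service"]),
   ("E-commerce", ["shop", "store", "retail", "marketplace", "commerce", "buy", "sell"]),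
   ("Fintech", ["finance", "banking", "payment", "fintech", "money", "investment"]),
   ("Healthcare", ["health", "medical", "care", "hospital", "clinic", "pharma"]),
   ("Education", ["education", "learning", "school", "university", "course", "training"]),
   ("Marketing", ["marketing", "advertising", "campaign", "promotion", "brand"]),
   ("Analytics", ["analytics", "data", "insights", "intelligence", "reporting"]),
   ("Communication", ["communication", "messaging", "chat", "video", "conference"]),
   ("Productivity", ["productivity", "workflow", "management", "organization"]),
   ("Security", ["security", "protection", "cyber", "antivirus", "firewall"])]

-- KEYWORD_INDEX = [(cat, kw) for cat, kws in CATEGORY_KEYWORDS for kw in kws]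
def pvKeywordIndex : List (String × String) :=
  pvCategoryKeywords.flatMap (fun p => p.2.map (fun kw => (p.1, kw)))

-- FIRST_CHAR_INDEX: the patterns bucketed by their keyword's first character
-- (pair[1][0]; headD is exact since every keyword literal is nonempty)
def pvBuckets : PySem.Dict Char (List (String × String)) :=
  pvKeywordIndex.foldl
    (fun d pair => d.modify (pair.2.toList.headD ' ') [] (fun l => l ++ [pair]))
    PySem.Dict.empty

def categorize_company_alt (company_name : String) (content : String) : String :=
  -- text = (company_name + " " + content).lower(), handled as its character list
  let text := (PySem.Str.lower (company_name ++ " " ++ content)).toList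
  -- for i in range(len(text)): for pair in FIRST_CHAR_INDEX.get(text[i], ()): ...
  -- text[i] is ported with getD, exact since pyRange gives 0 ≤ i < len(text);
  -- .get's () default for a missing bucket is the empty list
  let found : PySem.Set (String × String) :=
    (PySem.List.pyRange 0 (text.length : Int) 1).foldl
      (fun s i => (pvBuckets.getD (text.getD i.toNat ' ') []).foldl
        (fun s pair =>
          if PySem.Chars.startswith (text.drop i.toNat) pair.2.toList then PySem.Set.add s pair
          else s) s)
      PySem.Set.empty
  (pvCategoryKeywords.foldl (fun best p =>
      let score : Int := ((p.2.filter (fun kw => PySem.Set.contains found (p.1, kw))).length : Int)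
      if score > best.2 then (p.1, score) else best)
    ("Other", 0)).1

-- ===== PRECONDITION & SPEC =====
def Spec_categorize_company (company_name : String) (content : String) (out : String) : Prop := out = categorize_company_alt company_name content
instance (company_name : String) (content : String) (out : String) : Decidable (Spec_categorize_company company_name content out) := by unfold Spec_categorize_company; infer_instance

-- ===== CLAIM (what is proved, stated in full; the proofs are below) =====
def Claim_equal_categorize_company : Prop := ∀ (company_name : String) (content : String), Dom_categorize_company company_name content → Spec_categorize_company company_name content (categorize_company company_name content)

-- ===== LEMMAS AND PROOFS =====

-- A's lowered-then-concatenated text and B's concatenated-then-lowered text are the same string of characters.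
theorem pv_lower_append (a b : String) :
    ((PySem.Str.lower a) ++ " " ++ (if b ≠ "" then PySem.Str.lower b else "")).toList
      = (PySem.Str.lower (a ++ " " ++ b)).toList := by
  by_cases hb : b = "" <;>
    simp [hb, PySem.Chars.lower, String.toList_append] <;> decide

-- Membership in B's inner fold (one text position): an element is in the result iff it
-- was there already or it is a pattern of the index matching at this position.
theorem pv_mem_inner (c : String × String → Bool) :
    ∀ (l : List (String × String)) (s : PySem.Set (String × String)) (x : String × String),
      (x ∈ l.foldl (fun s pair => if c pair then PySem.Set.add s pair else s) s)
        ↔ x ∈ s ∨ (x ∈ l ∧ c x = true) := by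
  intro l
  induction l with
  | nil => intro s x; simp
  | cons y ys ih =>
    intro s x
    rw [List.foldl_cons]
    by_cases hy : c y = true
    · rw [if_pos hy, ih]
      simp only [PySem.Set.mem_add, List.mem_cons]
      constructor
      · rintro ((h | h) | h)
        · exact Or.inl h
        · subst h; exact Or.inr ⟨Or.inl rfl, hy⟩
        · exact Or.inr ⟨Or.inr h.1, h.2⟩
      · rintro (h | ⟨(h | h), hc⟩)
        · exact Or.inl (Or.inl h)
        · subst h; exact Or.inl (Or.inr rfl)
        · exact Or.inr ⟨h, hc⟩
    · rw [if_neg hy, ih]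
      simp only [List.mem_cons]
      constructor
      · rintro (h | h)
        · exact Or.inl h
        · exact Or.inr ⟨Or.inr h.1, h.2⟩
      · rintro (h | ⟨(h | h), hc⟩)
        · exact Or.inl h
        · subst h; exact absurd hc hy
        · exact Or.inr ⟨h, hc⟩

-- Membership in B's whole found set: matched at some scanned position (the per-position
-- candidate list idx i is the first-character bucket there).
theorem pv_mem_outer (c : Int → String × String → Bool) (idx : Int → List (String × String)) :
    ∀ (rng : List Int) (s : PySem.Set (String × String)) (x : String × String),
      (x ∈ rng.foldl (fun s i => (idx i).foldl
          (fun s pair => if c i pair then PySem.Set.add s pair else s) s) s)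
        ↔ x ∈ s ∨ ∃ i ∈ rng, x ∈ idx i ∧ c i x = true := by
  intro rng
  induction rng with
  | nil => intro s x; simp
  | cons i is ih =>
    intro s x
    rw [List.foldl_cons, ih, pv_mem_inner]
    constructor
    · rintro ((h | h) | ⟨j, hj, h⟩)
      · exact Or.inl h
      · exact Or.inr ⟨i, List.mem_cons_self, h⟩
      · exact Or.inr ⟨j, List.mem_cons_of_mem _ hj, h⟩
    · rintro (h | ⟨j, hj, h⟩)
      · exact Or.inl (Or.inl h)
      · rcases List.mem_cons.mp hj with rfl | hj'
        · exact Or.inl (Or.inr h)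
        · exact Or.inr ⟨j, hj', h⟩

-- A pattern sits in the bucket of exactly its keyword's first character.
theorem pv_bucket_mem (c : Char) (x : String × String) :
    x ∈ pvBuckets.getD c [] ↔ x ∈ pvKeywordIndex ∧ x.2.toList.headD ' ' = c := by
  unfold pvBuckets
  have hfold : (pvKeywordIndex.foldl
        (fun d pair => d.modify (pair.2.toList.headD ' ') [] (fun l => l ++ [pair]))
        PySem.Dict.empty)
      = ((pvKeywordIndex.map (fun pair => (((pair.2.toList.headD ' ' : Char), pair)))).foldl
          (fun d p => d.modify p.1 [] (fun l => l ++ [p.2])) PySem.Dict.empty) := by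
    rw [List.foldl_map]
  rw [hfold, PySem.Dict.getD_foldl_modify_append]
  simp only [List.mem_append, List.mem_map, List.mem_filter]
  constructor
  · rintro (h | ⟨p, ⟨⟨q, hq, rfl⟩, hc⟩, rfl⟩)
    · exact absurd h (by simp [PySem.Dict.empty, PySem.Dict.getD, PySem.Dict.get?])
    · exact ⟨hq, by simpa using hc⟩
  · rintro ⟨hx, hc⟩
    exact Or.inr ⟨(x.2.toList.headD ' ', x), ⟨⟨x, hx, rfl⟩, by simpa using hc⟩, rfl⟩

-- The bucketed positional match over range(len(text)) is exactly Python's 'kw in text'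
-- for a pattern of the index (its keyword is nonempty).
theorem pv_scan_iff_isIn (text : List Char) (x : String × String)
    (hx : x ∈ pvKeywordIndex) (hkw : x.2.toList ≠ []) :
    (∃ i ∈ PySem.List.pyRange 0 (text.length : Int) 1,
        x ∈ pvBuckets.getD (text.getD i.toNat ' ') [] ∧
        PySem.Chars.startswith (text.drop i.toNat) x.2.toList = true)
      ↔ PySem.Chars.isIn x.2.toList text = true := by
  rw [← PySem.Chars.exists_prefix_drop_iff_isIn]
  constructor
  · rintro ⟨i, _, _, hs⟩
    exact ⟨i.toNat, (PySem.Chars.startswith_iff _ _).mp hs⟩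
  · rintro ⟨j, hp⟩
    obtain ⟨k0, ks, hk⟩ := List.exists_cons_of_ne_nil hkw
    obtain ⟨t, ht⟩ := hp
    rw [hk] at ht
    have hdj : text.drop j = k0 :: (ks ++ t) := by rw [← ht]; simp
    have hjlt : j < text.length := by
      by_contra h
      have hnil : text.drop j = [] := List.drop_eq_nil_of_le (by omega)
      rw [hnil] at hdj
      exact List.cons_ne_nil _ _ hdj.symm
    have h1 : text[j]? = some k0 := by
      have h2 : (text.drop j)[(0 : Nat)]? = text[j + 0]? := List.getElem?_drop
      rw [hdj] at h2
      simpa using h2.symm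
    have hgd : text.getD j ' ' = k0 := by
      rw [List.getD_eq_getElem?_getD, h1]
      rfl
    refine ⟨(j : Int), ?_, ?_, ?_⟩
    · rw [PySem.List.mem_pyRange_one]
      constructor
      · exact_mod_cast Nat.zero_le j
      · exact_mod_cast hjlt
    · rw [Int.toNat_natCast, hgd, pv_bucket_mem]
      exact ⟨hx, by rw [hk]; rfl⟩
    · rw [Int.toNat_natCast]
      exact (PySem.Chars.startswith_iff _ _).mpr ⟨t, by rw [hk]; exact ht⟩

-- B's fold ignores every category with a non-positive score once the running score is ≥ 0.
theorem pv_bfold_filter (f : String × List String → Int) :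
    ∀ (l : List (String × List String)) (acc : String × Int), 0 ≤ acc.2 →
      l.foldl (fun acc p => if f p > acc.2 then (p.1, f p) else acc) acc
        = (l.filter (fun p => decide (0 < f p))).foldl
            (fun acc p => if f p > acc.2 then (p.1, f p) else acc) acc := by
  intro l
  induction l with
  | nil => intro acc _; rfl
  | cons x xs ih =>
    intro acc hacc
    simp only [List.filter_cons, decide_eq_true_eq]
    by_cases hx : 0 < f x
    · rw [if_pos hx, List.foldl_cons, List.foldl_cons]
      refine ih _ ?_
      by_cases hgt : f x > acc.2
      · rw [if_pos hgt]; exact le_of_lt hx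
      · rw [if_neg hgt]; exact hacc
    · have hle : ¬ f x > acc.2 := by omega
      rw [if_neg hx, List.foldl_cons, if_neg hle]
      exact ih acc hacc

-- Correspondence between A's running first-max (an Option accumulator over names, key g)
-- and B's running (best, score) pair, over a list where every score is positive.
theorem pv_core (g : String → Int) (f : String × List String → Int) :
    ∀ (m : List (String × List String)) (accA : Option String) (accB : String × Int),
      (∀ p ∈ m, g p.1 = f p ∧ 0 < f p) →
      ((accA = none ∧ accB = ("Other", 0)) ∨ (∃ k, accA = some k ∧ accB = (k, g k))) →
      ((m.foldl (fun acc p => match acc with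
          | none => some p.1
          | some mm => if g mm < g p.1 then some p.1 else some mm) accA = none ∧
        m.foldl (fun acc p => if f p > acc.2 then (p.1, f p) else acc) accB = ("Other", 0)) ∨
       (∃ k, m.foldl (fun acc p => match acc with
          | none => some p.1
          | some mm => if g mm < g p.1 then some p.1 else some mm) accA = some k ∧
        m.foldl (fun acc p => if f p > acc.2 then (p.1, f p) else acc) accB = (k, g k))) := by
  intro m
  induction m with
  | nil => intro accA accB _ hinv; exact hinv
  | cons x xs ih =>
    intro accA accB hm hinv
    have hx := hm x (List.mem_cons_self)
    have hxs : ∀ p ∈ xs, g p.1 = f p ∧ 0 < f p := fun p hp => hm p (List.mem_cons_of_mem _ hp)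
    simp only [List.foldl_cons]
    rcases hinv with ⟨hA, hB⟩ | ⟨k, hA, hB⟩
    · subst hA; subst hB
      have hpos : f x > ((("Other", 0) : String × Int)).2 := hx.2
      refine ih _ _ hxs (Or.inr ⟨x.1, rfl, ?_⟩)
      simp [if_pos hpos, hx.1]
    · subst hA; subst hB
      by_cases hlt : g k < g x.1
      · have : f x > ((k, g k) : String × Int).2 := by
          have := hx.1; simp at hlt ⊢; omega
        refine ih _ _ hxs (Or.inr ⟨x.1, by simp [if_pos hlt], ?_⟩)
        simp [if_pos this, hx.1]
      · have : ¬ f x > ((k, g k) : String × Int).2 := by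
          have := hx.1; simp at hlt ⊢; omega
        exact ih _ _ hxs (Or.inr ⟨k, by simp [if_neg hlt], by simp [if_neg this]⟩)

-- Master lemma: for any category list with distinct names and two pointwise-equal score
-- functions, A's dict-then-max structure returns B's online-fold result.
theorem pv_master (l : List (String × List String)) (hnd : (l.map (·.1)).Nodup)
    (f g : String × List String → Int) (hfg : ∀ p ∈ l, f p = g p)
    (d : PySem.Dict String Int)
    (hdd : d = l.foldl (fun d p => if f p > 0 then d.insert p.1 (f p) else d) PySem.Dict.empty) :
    (if d.size ≠ 0 then (PySem.List.max? d.keys (fun k => d.getD k 0)).getD "Other" else "Other")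
      = (l.foldl (fun best p => if g p > best.2 then (p.1, g p) else best) ("Other", 0)).1 := by
  have hstep : l.foldl (fun d p => if f p > 0 then d.insert p.1 (f p) else d) PySem.Dict.empty
      = l.foldl (fun d p => if g p > 0 then d.insert p.1 (g p) else d) PySem.Dict.empty := by
    refine PySem.List.foldl_congr_mem l _ _ _ ?_
    intro acc p hp
    rw [hfg p hp]
  rw [hstep] at hdd
  have hd : d = (l.filter (fun p => decide (0 < g p))).foldl
      (fun d p => d.insert p.1 (g p)) PySem.Dict.empty := by
    rw [hdd]
    exact PySem.List.foldl_ite_eq_foldl_filter (fun p => 0 < g p) _ l _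
  set m := l.filter (fun p => decide (0 < g p)) with hm
  have hmsub : (m.map (·.1)).Nodup := by
    have hsubl : m.Sublist l := List.filter_sublist
    exact hnd.sublist (hsubl.map _)
  have hitems : d.items = m.map (fun p => (p.1, g p)) := by
    rw [hd]
    rw [PySem.Dict.items_foldl_insert_fresh m (·.1) (fun p => g p) PySem.Dict.empty
      (by intro a _; simp [PySem.Dict.contains_empty]) hmsub]
    simp [PySem.Dict.empty]
  have hkeys : d.keys = m.map (·.1) := by
    simp only [PySem.Dict.keys, hitems, List.map_map]; rfl
  have hknd : d.keys.Nodup := by rw [hkeys]; exact hmsub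
  have hg : ∀ p ∈ m, d.getD p.1 0 = g p := by
    intro p hp
    have hmem : (p.1, g p) ∈ d.items := by
      rw [hitems]; exact List.mem_map_of_mem hp
    exact PySem.Dict.getD_of_mem_items d hmem hknd 0
  have hB : l.foldl (fun best p => if g p > best.2 then (p.1, g p) else best) ("Other", 0)
      = m.foldl (fun best p => if g p > best.2 then (p.1, g p) else best) ("Other", 0) :=
    pv_bfold_filter g l _ (by norm_num)
  have hmpos : ∀ p ∈ m, (fun k => d.getD k 0) p.1 = g p ∧ 0 < g p := by
    intro p hp
    refine ⟨hg p hp, ?_⟩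
    have := List.of_mem_filter hp
    simpa using this
  have hcore := pv_core (fun k => d.getD k 0) g m none ("Other", 0) hmpos (Or.inl ⟨rfl, rfl⟩)
  have hmax : PySem.List.max? d.keys (fun k => d.getD k 0)
      = m.foldl (fun acc p => match acc with
          | none => some p.1
          | some mm => if d.getD mm 0 < d.getD p.1 0 then some p.1 else some mm) none := by
    rw [hkeys]
    simp only [PySem.List.max?, List.foldl_map]
    refine PySem.List.foldl_congr_mem _ _ _ _ ?_
    intro acc p _
    cases acc <;> rfl
  rcases hcore with ⟨hA, hBv⟩ | ⟨k, hA, hBv⟩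
  · -- no positive score: the dict is empty
    have hnone : PySem.List.max? d.keys (fun k => d.getD k 0) = none := by rw [hmax, hA]
    rw [PySem.List.max?_eq_none_iff] at hnone
    have hmnil : m = [] := by
      rw [hkeys] at hnone
      exact List.map_eq_nil_iff.mp hnone
    have hsz : d.size = 0 := by
      simp [PySem.Dict.size, hitems, hmnil]
    rw [hB, hmnil]
    simp [hsz]
  · have hsome : PySem.List.max? d.keys (fun k => d.getD k 0) = some k := hmax.trans hA
    have hmne : m ≠ [] := by
      intro h
      rw [h] at hA; exact Option.some_ne_none k hA.symm
    have hsz : d.size ≠ 0 := by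
      simp only [PySem.Dict.size, hitems, List.length_map]
      exact fun h => hmne (List.eq_nil_of_length_eq_zero h)
    rw [hB, hBv]
    simp [hsz, hsome]

-- Proof-side names for the two score functions and B's found set (cn/ct fixed inputs).
def pvText (cn ct : String) : List Char := (PySem.Str.lower (cn ++ " " ++ ct)).toList

def pvFound (cn ct : String) : PySem.Set (String × String) :=
  (PySem.List.pyRange 0 ((pvText cn ct).length : Int) 1).foldl
    (fun s i => (pvBuckets.getD ((pvText cn ct).getD i.toNat ' ') []).foldl
      (fun s pair =>
        if PySem.Chars.startswith ((pvText cn ct).drop i.toNat) pair.2.toList then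
          PySem.Set.add s pair
        else s) s)
    PySem.Set.empty

def pvG (cn ct : String) (p : String × List String) : Int :=
  ((p.2.filter (fun kw => PySem.Set.contains (pvFound cn ct) (p.1, kw))).length : Int)

def pvF (cn ct : String) (p : String × List String) : Int :=
  ((p.2.filter (fun keyword => PySem.Str.isIn keyword ((PySem.Str.lower cn) ++ " " ++
      (if ct ≠ "" then PySem.Str.lower ct else "")))).map (fun _ => (1 : Int))).sum

-- The two ports, rewritten with those names (definitional).
theorem pv_a_eq (cn ct : String) : categorize_company cn ct =
    (if (pvCategoryKeywords.foldl
          (fun d p => if pvF cn ct p > 0 then d.insert p.1 (pvF cn ct p) else d)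
          PySem.Dict.empty).size ≠ 0 then
      (PySem.List.max?
        (pvCategoryKeywords.foldl
          (fun d p => if pvF cn ct p > 0 then d.insert p.1 (pvF cn ct p) else d)
          PySem.Dict.empty).keys
        (fun k => (pvCategoryKeywords.foldl
          (fun d p => if pvF cn ct p > 0 then d.insert p.1 (pvF cn ct p) else d)
          PySem.Dict.empty).getD k 0)).getD "Other"
    else "Other") := rfl

theorem pv_alt_eq (cn ct : String) : categorize_company_alt cn ct =
    (pvCategoryKeywords.foldl
      (fun best p => if pvG cn ct p > best.2 then (p.1, pvG cn ct p) else best)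
      ("Other", 0)).1 := rfl

-- Characterisation of B's found set: a pattern is collected iff it is in the index and
-- its keyword occurs in the text.
theorem pv_contains_found (cn ct : String) (x : String × String) :
    (PySem.Set.contains (pvFound cn ct) x = true)
      ↔ x ∈ pvKeywordIndex ∧ PySem.Chars.isIn x.2.toList (pvText cn ct) = true := by
  have hne : ∀ q ∈ pvKeywordIndex, q.2.toList ≠ [] := by decide
  rw [PySem.Set.contains_iff]
  unfold pvFound
  rw [pv_mem_outer
    (fun i pair => PySem.Chars.startswith ((pvText cn ct).drop i.toNat) pair.2.toList)
    (fun i => pvBuckets.getD ((pvText cn ct).getD i.toNat ' ') [])]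
  constructor
  · rintro (h | ⟨i, hi, hb, hc⟩)
    · exact absurd h (List.not_mem_nil)
    · have hx := ((pv_bucket_mem _ x).mp hb).1
      exact ⟨hx, (pv_scan_iff_isIn (pvText cn ct) x hx (hne x hx)).mp ⟨i, hi, hb, hc⟩⟩
  · rintro ⟨hx, hin⟩
    rcases (pv_scan_iff_isIn (pvText cn ct) x hx (hne x hx)).mpr hin with ⟨i, hi, hb, hc⟩
    exact Or.inr ⟨i, hi, hb, hc⟩

-- The two score functions agree on every category row.
theorem pv_fg (cn ct : String) : ∀ p ∈ pvCategoryKeywords, pvF cn ct p = pvG cn ct p := by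
  have hmem : ∀ q ∈ pvCategoryKeywords, ∀ kw ∈ q.2, (q.1, kw) ∈ pvKeywordIndex := by decide
  intro p hp
  have hfilter : p.2.filter (fun keyword => PySem.Str.isIn keyword ((PySem.Str.lower cn) ++ " " ++
        (if ct ≠ "" then PySem.Str.lower ct else "")))
      = p.2.filter (fun kw => PySem.Set.contains (pvFound cn ct) (p.1, kw)) := by
    apply List.filter_congr
    intro kw hkw
    rw [Bool.eq_iff_iff, pv_contains_found, PySem.Str.isIn_eq]
    have htext : ((PySem.Str.lower cn) ++ " " ++
        (if ct ≠ "" then PySem.Str.lower ct else "")).toList = pvText cn ct := pv_lower_append cn ct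
    rw [htext]
    exact ⟨fun h => ⟨hmem p hp kw hkw, h⟩, fun h => h.2⟩
  unfold pvF pvG
  rw [hfilter, PySem.List.sum_map_const_int]
  simp

-- ===== VERDICT (by name: the statement is the Claim_ definition above) =====
theorem categorize_company_spec : Claim_equal_categorize_company := by
  intro company_name content _
  unfold Spec_categorize_company
  rw [pv_a_eq, pv_alt_eq]
  exact pv_master pvCategoryKeywords (by decide) (pvF company_name content)
    (pvG company_name content) (pv_fg company_name content) _ rfl
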